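-- pv_equiv track=rewrite | github.com/mithro/gdoc2dhcpd | src/gdoc2netcfg/supplements/bridge.py | _bitmap_to_ports
-- ===== SOURCE A (Python) =====
-- def _bitmap_to_ports(bitmap: str) -> frozenset[int]:
--     """Convert SNMP VLAN port bitmap to set of port numbers.
--
--     SNMP OctetString bitmaps are stored in JSON as raw character strings
--     where each character's codepoint represents a byte value (0-255).
--     Bit 7 of byte 0 = port 1, bit 6 = port 2, etc.
--
--     Args:
--         bitmap: Raw byte string from SNMP OctetString via JSON.
--
--     Returns:
--         Set of 1-based port numbers that are set in the bitmap.
--     """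
--     if not bitmap:
--         return frozenset()
--     try:
--         bitmap_bytes = bitmap.encode("latin-1")
--     except UnicodeEncodeError:
--         return frozenset()
--     ports = set()
--     for byte_idx, byte_val in enumerate(bitmap_bytes):
--         for bit in range(8):
--             if byte_val & (0x80 >> bit):
--                 ports.add(byte_idx * 8 + bit + 1)
--     return frozenset(ports)
-- ===== SOURCE B (Python) =====
-- def _bitmap_to_ports(bitmap: str) -> frozenset[int]:
--     """Convert SNMP VLAN port bitmap to set of port numbers.
--
--     Re-implementation: pack the whole bitmap into one big integer
--     (big-endian) and test each port's bit with a shift, instead of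
--     nested byte/bit-mask loops.
--     """
--     if not bitmap:
--         return frozenset()
--     try:
--         bitmap_bytes = bitmap.encode("latin-1")
--     except UnicodeEncodeError:
--         return frozenset()
--     n = int.from_bytes(bitmap_bytes, "big")
--     total = len(bitmap_bytes) * 8
--     return frozenset(p for p in range(1, total + 1) if (n >> (total - p)) & 1)
-- ===== Notes on version B (the rewrite author's own statement) =====
-- stated objective: alternative
-- what changed: Replaces the nested enumerate-bytes x bit-mask loops with a single big-endian integer built by int.from_bytes and one flat pass over port positions tested by shift-and-mask (a different representation of the bitmap, not faster: big-int shifts make B quadratic in bit operations on very large bitmaps).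
import Mathlib
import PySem

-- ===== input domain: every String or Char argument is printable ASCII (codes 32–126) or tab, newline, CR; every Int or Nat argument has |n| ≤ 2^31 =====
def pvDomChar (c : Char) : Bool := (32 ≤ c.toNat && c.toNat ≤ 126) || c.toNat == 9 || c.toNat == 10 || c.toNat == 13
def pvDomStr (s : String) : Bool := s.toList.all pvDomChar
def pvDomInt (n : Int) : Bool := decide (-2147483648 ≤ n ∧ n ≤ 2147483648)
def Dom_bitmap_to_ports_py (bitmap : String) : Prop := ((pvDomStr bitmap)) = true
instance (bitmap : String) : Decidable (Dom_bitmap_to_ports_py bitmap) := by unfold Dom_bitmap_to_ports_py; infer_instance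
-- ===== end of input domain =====

-- B replaces A's nested byte/bit-mask loops by one big-endian integer and a single
-- flat shift-and-test pass over port positions (objective: alternative, same cost).

-- ===== PORT A =====
-- Python A: empty-string guard, latin-1 encode guard (raises iff some codepoint ≥ 256),
-- then nested loops: enumerate(bytes) × range(8), mask 0x80 >> bit, set.add.
def bitmap_to_ports_py (bitmap : String) : List Int :=
  if bitmap.toList.isEmpty then []
  else if bitmap.toList.any (fun ch => 256 ≤ ch.toNat) then []
  else
    (PySem.List.enumerate (bitmap.toList.map (fun ch => (ch.toNat : Int))) 0).foldl
      (fun ports p =>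
        (PySem.List.pyRange 0 8 1).foldl
          (fun ports bit =>
            if PySem.Int.band p.2 ((128 : Int) >>> bit.toNat) != 0 then
              PySem.Set.add ports (p.1 * 8 + bit + 1)
            else ports)
          ports)
      PySem.Set.empty

-- ===== PORT B =====
-- Python B: same two guards, then n = int.from_bytes(bytes, 'big') (ported as the
-- standard big-endian fold), and frozenset(p for p in range(1, total+1) if (n >> (total-p)) & 1).
def bitmap_to_ports_py_alt (bitmap : String) : List Int :=
  if bitmap.toList.isEmpty then []
  else if bitmap.toList.any (fun ch => 256 ≤ ch.toNat) then []
  else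
    let n : Nat := bitmap.toList.foldl (fun acc ch => acc * 256 + ch.toNat) 0
    let total : Nat := bitmap.toList.length * 8
    PySem.Set.ofList ((PySem.List.pyRange 1 ((total : Int) + 1) 1).filter
      (fun p => PySem.Int.band ((n : Int) >>> (total - p.toNat)) 1 != 0))

-- ===== PRECONDITION & SPEC =====
def Spec_bitmap_to_ports_py (bitmap : String) (out : List Int) : Prop := out = bitmap_to_ports_py_alt bitmap
instance (bitmap : String) (out : List Int) : Decidable (Spec_bitmap_to_ports_py bitmap out) := by unfold Spec_bitmap_to_ports_py; infer_instance

-- ===== CLAIM (what is proved, stated in full; the proofs are below) =====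
def Claim_equal_bitmap_to_ports_py : Prop := ∀ (bitmap : String), Dom_bitmap_to_ports_py bitmap → Spec_bitmap_to_ports_py bitmap (bitmap_to_ports_py bitmap)

-- ===== LEMMAS AND PROOFS =====

-- A's big-endian accumulator over the byte values.
def pvN (cs : List Char) : Nat := cs.foldl (fun acc ch => acc * 256 + ch.toNat) 0

-- B's core list (before the redundant ofList): the filtered range of positions.
def pvBcore (cs : List Char) : List Int :=
  (PySem.List.pyRange 1 ((cs.length * 8 : Nat) + 1) 1).filter
    (fun p => PySem.Int.band ((pvN cs : Int) >>> (cs.length * 8 - p.toNat)) 1 != 0)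

-- A's nested fold, starting from the empty set.
def pvAfold (cs : List Char) : List Int :=
  (PySem.List.enumerate (cs.map (fun ch => (ch.toNat : Int))) 0).foldl
    (fun ports p =>
      (PySem.List.pyRange 0 8 1).foldl
        (fun ports bit =>
          if PySem.Int.band p.2 ((128 : Int) >>> bit.toNat) != 0 then
            PySem.Set.add ports (p.1 * 8 + bit + 1)
          else ports)
        ports)
    PySem.Set.empty

-- A fold of fresh conditional set-adds is an append of the filtered, mapped list.
lemma pv_foldl_setadd_if {α : Type} (p : α → Bool) (f : α → Int) :
    ∀ (l : List α) (s : List Int),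
      (∀ x ∈ l, p x = true → f x ∉ s) → ((l.filter p).map f).Nodup →
      l.foldl (fun s x => if p x then PySem.Set.add s (f x) else s) s
        = s ++ (l.filter p).map f
  | [], s, _, _ => by simp
  | a :: l, s, h1, h2 => by
    by_cases hp : p a = true
    · rw [List.filter_cons_of_pos hp, List.map_cons] at h2
      have hnd := List.nodup_cons.mp h2
      have h1' : ∀ x ∈ l, p x = true → f x ∉ s ++ [f a] := by
        intro x hx hpx
        simp only [List.mem_append, List.mem_singleton, not_or]
        exact ⟨h1 x (List.mem_cons_of_mem a hx) hpx,
          fun heq => hnd.1 (heq ▸ List.mem_map_of_mem (List.mem_filter.mpr ⟨hx, hpx⟩))⟩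
      simp only [List.foldl_cons, if_pos hp]
      rw [PySem.Set.add_of_not_mem (h1 a List.mem_cons_self hp),
        pv_foldl_setadd_if p f l (s ++ [f a]) h1' hnd.2,
        List.filter_cons_of_pos hp, List.map_cons]
      simp
    · simp only [List.foldl_cons, if_neg hp]
      rw [pv_foldl_setadd_if p f l s (fun x hx => h1 x (List.mem_cons_of_mem a hx))
        (by rwa [List.filter_cons_of_neg (by simp [hp])] at h2),
        List.filter_cons_of_neg (by simp [hp])]

-- the shift-and-mask test is a Nat.testBit test
lemma pv_band_shift_testBit (n k : Nat) :
    (PySem.Int.band ((n : Int) >>> k) 1 != 0) = n.testBit k := by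
  rw [show ((n : Int) >>> k) = ((n >>> k : Nat) : Int) by simp [Int.natCast_shiftRight],
      show (1:Int) = ((1:Nat):Int) from rfl, PySem.Int.band_natCast, Nat.testBit, Nat.and_comm]
  cases hh : n >>> k &&& 1 <;> simp_all <;> omega

lemma pv_shift128 (k : Nat) (hk : k < 8) : (128 : Nat) >>> k = 2 ^ (7 - k) := by
  interval_cases k <;> rfl

lemma pv_testBit_low (N c k : Nat) (hc : c < 256) (hk : k < 8) :
    (N * 256 + c).testBit k = c.testBit k := by
  rw [show N*256+c = 2^8*N+c by ring, Nat.testBit_two_pow_mul_add N (by omega) k]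
  simp [hk]

lemma pv_testBit_high (N c k : Nat) (hc : c < 256) :
    (N * 256 + c).testBit (k + 8) = N.testBit k := by
  rw [show N*256+c = 2^8*N+c by ring, Nat.testBit_two_pow_mul_add N (by omega)]
  simp

lemma pv_bandA (c k : Nat) (hk : k < 8) :
    (PySem.Int.band (c : Int) ((128 : Int) >>> ((k : Nat) : Int)) != 0) = c.testBit (7 - k) := by
  rw [show (128:Int) >>> ((k : Nat) : Int) = (((128:Nat) >>> k : Nat) : Int) by rw [show (128:Int) = ((128:Nat):Int) from rfl, Int.shiftRight_natCast],
      PySem.Int.band_natCast, pv_shift128 k hk, Nat.and_two_pow]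
  cases h : c.testBit (7-k) <;> simp_all

-- core equivalence, by right-induction on the character list
lemma pv_core_eq (cs : List Char) (h : ∀ c ∈ cs, c.toNat < 256) :
    pvAfold cs = pvBcore cs := by
  induction cs using List.reverseRecOn with
  | nil => rfl
  | append_singleton cs c ih =>
    have hc : c.toNat < 256 := h c (by simp)
    have ihe := ih (fun x hx => h x (by simp [hx]))
    have hN : pvN (cs ++ [c]) = pvN cs * 256 + c.toNat := by
      simp [pvN, List.foldl_append]
    have hlen : (cs ++ [c]).length = cs.length + 1 := by simp
    -- A side: split off the last byte's inner loop
    have hA : pvAfold (cs ++ [c]) =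
        (PySem.List.pyRange 0 8 1).foldl
          (fun ports bit =>
            if PySem.Int.band ((c.toNat : Int)) ((128 : Int) >>> (bit.toNat : Int)) != 0 then
              PySem.Set.add ports (((0 : Int) + (cs.length : Int)) * 8 + bit + 1)
            else ports)
          (pvAfold cs) := by
      simp only [pvAfold, List.map_append, List.map_cons, List.map_nil,
        PySem.List.enumerate_append, List.foldl_append, PySem.List.enumerate_cons,
        PySem.List.enumerate_nil, List.foldl_cons, List.foldl_nil, List.length_map]
    have hbound : ∀ x ∈ pvAfold cs, x < (cs.length * 8 : Nat) + 1 := by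
      intro x hx
      rw [ihe] at hx
      have := PySem.List.mem_pyRange_one.mp (List.mem_of_mem_filter hx)
      exact this.2
    have h1 : ∀ bit ∈ PySem.List.pyRange 0 8 1,
        (PySem.Int.band ((c.toNat : Int)) ((128 : Int) >>> (bit.toNat : Int)) != 0) = true →
        ((0 : Int) + (cs.length : Int)) * 8 + bit + 1 ∉ pvAfold cs := by
      intro bit hbit _ hmem
      have hb := PySem.List.mem_pyRange_one.mp hbit
      have := hbound _ hmem
      omega
    have h2 : (((PySem.List.pyRange 0 8 1).filter
        (fun bit => PySem.Int.band ((c.toNat : Int)) ((128 : Int) >>> (bit.toNat : Int)) != 0)).map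
        (fun bit => ((0 : Int) + (cs.length : Int)) * 8 + bit + 1)).Nodup := by
      exact List.Nodup.map (fun a b hab => by omega)
        ((PySem.List.nodup_pyRange_one _ _).filter _)
    rw [hA, pv_foldl_setadd_if _ _ _ _ h1 h2, ihe]
    -- B side: split the range of positions
    show pvBcore cs ++ _ = _
    have hsplit : PySem.List.pyRange 1 (((cs ++ [c]).length * 8 : Nat) + 1) 1
        = PySem.List.pyRange 1 ((cs.length * 8 : Nat) + 1) 1
          ++ PySem.List.pyRange ((cs.length * 8 : Nat) + 1) (((cs.length * 8 + 8 : Nat)) + 1) 1 := by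
      rw [hlen, show ((cs.length + 1) * 8 : Nat) = cs.length * 8 + 8 by ring]
      exact PySem.List.pyRange_one_append 1 _ _ (by omega) (by push_cast; omega)
    unfold pvBcore
    rw [hsplit, List.filter_append, hN, hlen,
      show ((cs.length + 1) * 8 : Nat) = cs.length * 8 + 8 by ring]
    congr 1
    · -- low part: same filter as pvBcore cs
      apply List.filter_congr
      intro p hp
      obtain ⟨hp1, hp2⟩ := PySem.List.mem_pyRange_one.mp hp
      rw [pv_band_shift_testBit, pv_band_shift_testBit,
        show cs.length * 8 + 8 - p.toNat = (cs.length * 8 - p.toNat) + 8 by omega,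
        pv_testBit_high _ _ _ hc]
    · -- high part: the last byte's block
      rw [PySem.List.pyRange_one 0 8, PySem.List.pyRange_one ((cs.length * 8 : Nat) + 1),
        List.filter_map, List.filter_map, List.map_map,
        show ((8 : Int) - 0).toNat = 8 by rfl,
        show ((((cs.length * 8 + 8 : Nat) : Int) + 1) - (((cs.length * 8 : Nat) : Int) + 1)).toNat = 8 by push_cast; omega]
      rw [List.filter_congr (q := fun k => (c.toNat).testBit (7 - k)) (by
        intro k hk
        have hk8 : k < 8 := List.mem_range.mp hk
        show (PySem.Int.band ((c.toNat : Int)) ((128 : Int) >>> (((0 : Int) + (k : Int)).toNat : Int)) != 0) = _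
        rw [show (((0 : Int) + (k : Int)).toNat : Nat) = k by omega, pv_bandA _ _ hk8])]
      have hq : List.filter ((fun p => PySem.Int.band ((↑(pvN cs * 256 + c.toNat) : Int) >>> (cs.length * 8 + 8 - p.toNat)) 1 != 0) ∘ fun k => (↑(cs.length * 8) : Int) + 1 + ↑k) (List.range 8)
          = List.filter (fun k => c.toNat.testBit (7 - k)) (List.range 8) := by
        apply List.filter_congr
        intro k hk
        have hk8 : k < 8 := List.mem_range.mp hk
        simp only [Function.comp_apply]
        rw [show ((↑(cs.length * 8) : Int) + 1 + ↑k).toNat = cs.length * 8 + 1 + k by omega,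
          show cs.length * 8 + 8 - (cs.length * 8 + 1 + k) = 7 - k by omega,
          pv_band_shift_testBit, pv_testBit_low _ _ _ hc (by omega)]
      rw [hq]
      apply List.map_congr_left
      intro k hk
      simp only [Function.comp_apply]
      push_cast
      ring

lemma pv_Bcore_nodup (cs : List Char) : (pvBcore cs).Nodup :=
  (PySem.List.nodup_pyRange_one _ _).filter _

-- ===== VERDICT (by name: the statement is the Claim_ definition above) =====
theorem bitmap_to_ports_py_spec : Claim_equal_bitmap_to_ports_py := by
  intro bitmap _
  unfold Spec_bitmap_to_ports_py bitmap_to_ports_py bitmap_to_ports_py_alt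
  split_ifs with h1 h2
  · rfl
  · rfl
  · show pvAfold bitmap.toList = PySem.Set.ofList (pvBcore bitmap.toList)
    rw [pv_core_eq bitmap.toList (by
      intro c hc
      by_contra hlt
      exact h2 (List.any_eq_true.mpr ⟨c, hc, by simpa using by omega⟩))]
    exact (PySem.Set.ofList_eq_self_of_nodup _ (pv_Bcore_nodup bitmap.toList)).symm
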